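-- pv_equiv track=rewrite | github.com/Aryudesu/ABC | ABC/400_499/415/C.py | calc
-- ===== SOURCE A (Python) =====
-- def calc(N: int, ignore: set[int]) -> bool:
--     node = {0}
--     goal = 2 ** N - 1
--     while node:
--         next_node = set()
--         for num in node:
--             for i in range(N):
--                 m = 2**i
--                 if not (num & m) and not (num | m) in ignore:
--                     if (num | m) == goal:
--                         return True
--                     next_node.add(num | m)
--         node = next_node
--     return False
-- ===== SOURCE B (Python) =====
-- def calc(N: int, ignore: set[int]) -> bool:
--     # bottom-up DP over masks in ascending order instead of BFS by levels
--     if N <= 0: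
--         return False
--     goal = (1 << N) - 1
--     reachable = [False] * (goal + 1)
--     reachable[0] = True
--     for S in range(1, goal + 1):
--         if S not in ignore:
--             reachable[S] = any(reachable[S ^ (1 << i)] for i in range(N) if (S >> i) & 1)
--     return reachable[goal]
-- ===== Notes on version B (the rewrite author's own statement) =====
-- stated objective: alternative
-- what changed: Replaces the level-by-level BFS over frontier sets with a bottom-up dynamic program: one ascending pass over all masks filling a boolean table reachable[S], since every predecessor (one bit cleared) is numerically smaller.
import Mathlib
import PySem

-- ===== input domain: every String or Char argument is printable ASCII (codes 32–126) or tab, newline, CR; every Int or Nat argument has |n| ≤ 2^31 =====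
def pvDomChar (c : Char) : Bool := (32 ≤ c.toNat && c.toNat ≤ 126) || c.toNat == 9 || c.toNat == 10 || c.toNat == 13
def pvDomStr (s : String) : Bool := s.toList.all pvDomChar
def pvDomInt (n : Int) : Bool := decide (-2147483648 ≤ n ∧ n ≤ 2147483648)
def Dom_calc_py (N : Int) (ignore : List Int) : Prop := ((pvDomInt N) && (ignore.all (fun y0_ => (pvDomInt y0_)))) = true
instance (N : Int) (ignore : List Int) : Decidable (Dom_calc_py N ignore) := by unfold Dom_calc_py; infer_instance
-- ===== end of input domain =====

-- B replaces A's level-by-level BFS over frontier sets with a bottom-up DP filling a boolean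
-- table over all masks in ascending order (objective: alternative; same worst-case cost).

-- ===== PORT A =====
-- Masks are the nonnegative Python ints built from 0 by or-ing in 2**i (i ≥ 0), represented as Nat.
-- range(N) is empty for N ≤ 0, so List.range N.toNat is exact; goal = 2**N - 1 is only ever compared
-- inside that loop body (which runs only when 0 < N), so goal = 2 ^ N.toNat - 1 : Nat is exact there.
-- The inner 'for i in range(N)' body; acc = none means 'return True' already fired.
def calcInnerF (goal : Nat) (ignore : List Int) (num : Nat)
    (acc : Option (PySem.Set Nat)) (i : Nat) : Option (PySem.Set Nat) :=
  match acc with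
  | none => none
  | some s =>
    -- m = 2 ** i; 'if not (num & m) and not (num | m) in ignore:'
    if num &&& 2 ^ i = 0 ∧ ((num ||| 2 ^ i : Nat) : Int) ∉ ignore then
      if num ||| 2 ^ i = goal then none              -- 'return True'
      else some (PySem.Set.add s (num ||| 2 ^ i))    -- 'next_node.add(num | m)'
    else some s

-- One pass of the while-loop body: none = 'return True', some nx = the new frontier next_node.
def calcStep (n goal : Nat) (ignore : List Int) (node : List Nat) : Option (PySem.Set Nat) :=
  node.foldl (fun acc num => (List.range n).foldl (calcInnerF goal ignore num) acc)
    (some PySem.Set.empty)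

-- 'while node:' — fuel n+1 is a totality guard only: frontier k holds masks with exactly k bits
-- among the low n, so the frontier is empty after at most n+1 iterations, exactly as in Python.
def calcLoop (n goal : Nat) (ignore : List Int) : Nat → List Nat → Bool
  | 0, _ => false
  | fuel + 1, node =>
    if node.isEmpty then false
    else
      match calcStep n goal ignore node with
      | none => true
      | some nx => calcLoop n goal ignore fuel nx

def calc_py (N : Int) (ignore : List Int) : Bool :=
  calcLoop N.toNat (2 ^ N.toNat - 1) ignore (N.toNat + 1) (PySem.Set.ofList [0])

-- ===== PORT B =====
-- 'if S not in ignore: reachable[S] = any(reachable[S ^ (1 << i)] for i in range(N) if (S >> i) & 1)'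
def dpStep (n : Nat) (ignore : List Int) (tbl : List Bool) (S : Nat) : List Bool :=
  if (S : Int) ∈ ignore then tbl
  else tbl.set S ((List.range n).any fun i =>
    (((S >>> i) &&& 1) == 1) && tbl.getD (S ^^^ (1 <<< i)) false)

def calc_py_alt (N : Int) (ignore : List Int) : Bool :=
  if N ≤ 0 then false
  else
    let n := N.toNat
    let goal := 2 ^ n - 1
    -- reachable = [False] * (goal + 1); reachable[0] = True
    let init := (List.replicate (goal + 1) false).set 0 true
    -- for S in range(1, goal + 1): …
    let reachable := (List.range' 1 goal).foldl (dpStep n ignore) init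
    reachable.getD goal false

-- ===== PRECONDITION & SPEC =====
def Spec_calc_py (N : Int) (ignore : List Int) (out : Bool) : Prop := out = calc_py_alt N ignore
instance (N : Int) (ignore : List Int) (out : Bool) : Decidable (Spec_calc_py N ignore out) := by unfold Spec_calc_py; infer_instance

-- ===== CLAIM (what is proved, stated in full; the proofs are below) =====
def Claim_equal_calc_py : Prop := ∀ (N : Int) (ignore : List Int), Dom_calc_py N ignore → Spec_calc_py N ignore (calc_py N ignore)

-- ===== LEMMAS AND PROOFS =====

-- Reachability of a mask from 0 by repeatedly or-ing in an unset bit i < n, never passing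
-- through a mask in `ignore` (mask 0 itself is never tested by either program).
inductive Reach (n : Nat) (ignore : List Int) : Nat → Prop where
  | zero : Reach n ignore 0
  | step (m i : Nat) (hi : i < n) (hb : m.testBit i = false)
      (hig : ((m ||| 2 ^ i : Nat) : Int) ∉ ignore) (hm : Reach n ignore m) :
      Reach n ignore (m ||| 2 ^ i)

-- 'goal is reachable from num in at least one valid step' — what A's BFS detects.
inductive GR (n goal : Nat) (ignore : List Int) : Nat → Prop where
  | hit (num i : Nat) (hi : i < n) (hb : num.testBit i = false)
      (hig : ((num ||| 2 ^ i : Nat) : Int) ∉ ignore) (hg : num ||| 2 ^ i = goal) :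
      GR n goal ignore num
  | more (num i : Nat) (hi : i < n) (hb : num.testBit i = false)
      (hig : ((num ||| 2 ^ i : Nat) : Int) ∉ ignore) (hg : num ||| 2 ^ i ≠ goal)
      (h : GR n goal ignore (num ||| 2 ^ i)) : GR n goal ignore num

def popc (n m : Nat) : Nat := ((Finset.range n).filter (fun j => m.testBit j = true)).card

-- ----- bit facts -----
lemma and2pow_eq_zero_iff (m i : Nat) : m &&& 2 ^ i = 0 ↔ m.testBit i = false := by
  simp [Nat.and_two_pow]

lemma shift_and_one (S i : Nat) : (((S >>> i) &&& 1) == 1) = S.testBit i := by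
  simp [Nat.testBit, Nat.and_comm]

lemma xor_lt_self (x i : Nat) (h : x.testBit i = true) : x ^^^ 2 ^ i < x := by
  apply Nat.lt_of_testBit i
  · simp [Nat.testBit_xor, h]
  · exact h
  · intro j hj
    have hne : i ≠ j := by omega
    simp [Nat.testBit_xor, hne]

lemma or_xor_cancel (m i : Nat) (h : m.testBit i = false) : (m ||| 2 ^ i) ^^^ 2 ^ i = m := by
  apply Nat.eq_of_testBit_eq; intro j
  by_cases hij : i = j
  · subst hij; simp [Nat.testBit_xor, Nat.testBit_or, h]
  · simp [Nat.testBit_xor, Nat.testBit_or, hij]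

lemma xor_or_cancel (S i : Nat) (h : S.testBit i = true) : (S ^^^ 2 ^ i) ||| 2 ^ i = S := by
  apply Nat.eq_of_testBit_eq; intro j
  by_cases hij : i = j
  · subst hij; simp [Nat.testBit_xor, Nat.testBit_or, h]
  · simp [Nat.testBit_xor, Nat.testBit_or, hij]

lemma testBit_xor_self (S i : Nat) (h : S.testBit i = true) : (S ^^^ 2 ^ i).testBit i = false := by
  simp [Nat.testBit_xor, h]

lemma testBit_or_self (m i : Nat) : (m ||| 2 ^ i).testBit i = true := by
  simp [Nat.testBit_or]

lemma or_lt_pow (m n i : Nat) (hm : m < 2 ^ n) (hi : i < n) : m ||| 2 ^ i < 2 ^ n :=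
  Nat.or_lt_two_pow hm (Nat.pow_lt_pow_right (by omega) hi)

-- ----- popcount facts -----
lemma popc_le (n m : Nat) : popc n m ≤ n := by
  simpa [popc] using Finset.card_filter_le (Finset.range n) _

lemma popc_zero (n : Nat) : popc n 0 = 0 := by
  unfold popc
  rw [Finset.card_eq_zero, Finset.filter_eq_empty_iff]
  intro j _
  simp [Nat.zero_testBit]

lemma popc_or (n m i : Nat) (hi : i < n) (hb : m.testBit i = false) :
    popc n (m ||| 2 ^ i) = popc n m + 1 := by
  unfold popc
  have he : ((Finset.range n).filter (fun j => (m ||| 2 ^ i).testBit j = true))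
      = ((Finset.range n).filter (fun j => m.testBit j = true)) ∪ {i} := by
    ext j
    simp only [Finset.mem_filter, Finset.mem_union, Finset.mem_singleton, Nat.testBit_or,
      Nat.testBit_two_pow, Bool.or_eq_true, decide_eq_true_eq, Finset.mem_range]
    constructor
    · rintro ⟨hj, hc | rfl⟩
      · exact Or.inl ⟨hj, hc⟩
      · exact Or.inr rfl
    · rintro (⟨hj, hc⟩ | rfl)
      · exact ⟨hj, Or.inl hc⟩
      · exact ⟨hi, Or.inr rfl⟩
  rw [he, Finset.card_union_of_disjoint]
  · simp
  · simp [Finset.disjoint_singleton_right, hb]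

-- ----- characterisation of A's step -----
def hitP (n goal : Nat) (ignore : List Int) (num : Nat) : Prop :=
  ∃ i < n, num.testBit i = false ∧ ((num ||| 2 ^ i : Nat) : Int) ∉ ignore ∧ num ||| 2 ^ i = goal

def succP (n goal : Nat) (ignore : List Int) (num x : Nat) : Prop :=
  ∃ i < n, num.testBit i = false ∧ ((num ||| 2 ^ i : Nat) : Int) ∉ ignore ∧
    num ||| 2 ^ i ≠ goal ∧ x = num ||| 2 ^ i

lemma inner_none (goal : Nat) (ignore : List Int) (num : Nat) (L : List Nat) :
    L.foldl (calcInnerF goal ignore num) none = none := by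
  induction L with
  | nil => rfl
  | cons a L ih => simpa [calcInnerF] using ih

lemma inner_eq_none_iff (goal : Nat) (ignore : List Int) (num : Nat) (L : List Nat)
    (s : PySem.Set Nat) :
    L.foldl (calcInnerF goal ignore num) (some s) = none ↔
      ∃ i ∈ L, num.testBit i = false ∧ ((num ||| 2 ^ i : Nat) : Int) ∉ ignore ∧
        num ||| 2 ^ i = goal := by
  induction L generalizing s with
  | nil => simp
  | cons a L ih =>
    simp only [List.foldl_cons]
    by_cases h1 : num &&& 2 ^ a = 0 ∧ ((num ||| 2 ^ a : Nat) : Int) ∉ ignore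
    · by_cases h2 : num ||| 2 ^ a = goal
      · simp only [calcInnerF, if_pos h1, if_pos h2, inner_none]
        constructor
        · intro _; exact ⟨a, by simp, (and2pow_eq_zero_iff _ _).mp h1.1, h1.2, h2⟩
        · intro _; trivial
      · simp only [calcInnerF, if_pos h1, if_neg h2, ih]
        constructor
        · rintro ⟨i, hi, h⟩; exact ⟨i, by simp [hi], h⟩
        · rintro ⟨i, hi, h⟩
          rcases List.mem_cons.mp hi with rfl | hi
          · exact absurd h.2.2 h2
          · exact ⟨i, hi, h⟩
    · simp only [calcInnerF, if_neg h1, ih]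
      constructor
      · rintro ⟨i, hi, h⟩; exact ⟨i, by simp [hi], h⟩
      · rintro ⟨i, hi, h⟩
        rcases List.mem_cons.mp hi with rfl | hi
        · exact absurd ⟨(and2pow_eq_zero_iff _ _).mpr h.1, h.2.1⟩ h1
        · exact ⟨i, hi, h⟩

lemma inner_eq_some_mem (goal : Nat) (ignore : List Int) (num : Nat) (L : List Nat)
    (s s' : PySem.Set Nat)
    (h : L.foldl (calcInnerF goal ignore num) (some s) = some s') (x : Nat) :
    x ∈ s' ↔ x ∈ s ∨ ∃ i ∈ L, num.testBit i = false ∧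
      ((num ||| 2 ^ i : Nat) : Int) ∉ ignore ∧ num ||| 2 ^ i ≠ goal ∧ x = num ||| 2 ^ i := by
  induction L generalizing s with
  | nil => simp at h; subst h; simp
  | cons a L ih =>
    simp only [List.foldl_cons] at h
    by_cases h1 : num &&& 2 ^ a = 0 ∧ ((num ||| 2 ^ a : Nat) : Int) ∉ ignore
    · by_cases h2 : num ||| 2 ^ a = goal
      · rw [calcInnerF] at h; rw [if_pos h1, if_pos h2] at h
        rw [inner_none] at h; exact absurd h (by simp)
      · rw [calcInnerF] at h; rw [if_pos h1, if_neg h2] at h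
        rw [ih _ h, PySem.Set.mem_add]
        constructor
        · rintro ((hx | rfl) | ⟨i, hi, hh⟩)
          · exact Or.inl hx
          · exact Or.inr ⟨a, by simp, (and2pow_eq_zero_iff _ _).mp h1.1, h1.2, h2, rfl⟩
          · exact Or.inr ⟨i, by simp [hi], hh⟩
        · rintro (hx | ⟨i, hi, hh⟩)
          · exact Or.inl (Or.inl hx)
          · rcases List.mem_cons.mp hi with rfl | hi
            · exact Or.inl (Or.inr hh.2.2.2)
            · exact Or.inr ⟨i, hi, hh⟩
    · rw [calcInnerF] at h; rw [if_neg h1] at h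
      rw [ih _ h]
      constructor
      · rintro (hx | ⟨i, hi, hh⟩)
        · exact Or.inl hx
        · exact Or.inr ⟨i, by simp [hi], hh⟩
      · rintro (hx | ⟨i, hi, hh⟩)
        · exact Or.inl hx
        · rcases List.mem_cons.mp hi with rfl | hi
          · exact absurd ⟨(and2pow_eq_zero_iff _ _).mpr hh.1, hh.2.1⟩ h1
          · exact Or.inr ⟨i, hi, hh⟩

lemma outer_none (n goal : Nat) (ignore : List Int) (node : List Nat) :
    node.foldl (fun acc num => (List.range n).foldl (calcInnerF goal ignore num) acc) none
      = none := by
  induction node with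
  | nil => rfl
  | cons a node ih => simpa [inner_none] using ih

lemma step_eq_none_iff (n goal : Nat) (ignore : List Int) (node : List Nat)
    (s : PySem.Set Nat) :
    node.foldl (fun acc num => (List.range n).foldl (calcInnerF goal ignore num) acc) (some s)
        = none ↔
      ∃ num ∈ node, hitP n goal ignore num := by
  induction node generalizing s with
  | nil => simp
  | cons a node ih =>
    simp only [List.foldl_cons]
    rcases hcase : (List.range n).foldl (calcInnerF goal ignore a) (some s) with _ | s₁
    · rw [outer_none]
      rw [inner_eq_none_iff] at hcase
      simp only [true_iff]
      rcases hcase with ⟨i, hi, h⟩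
      exact ⟨a, by simp, i, List.mem_range.mp hi, h⟩
    · rw [ih]
      constructor
      · rintro ⟨num, hnum, h⟩; exact ⟨num, by simp [hnum], h⟩
      · rintro ⟨num, hnum, h⟩
        rcases List.mem_cons.mp hnum with rfl | hnum
        · exfalso
          rcases h with ⟨i, hi, h⟩
          have : (List.range n).foldl (calcInnerF goal ignore num) (some s) = none := by
            rw [inner_eq_none_iff]; exact ⟨i, List.mem_range.mpr hi, h⟩
          rw [this] at hcase; exact absurd hcase (by simp)
        · exact ⟨num, hnum, h⟩

lemma step_eq_some_mem (n goal : Nat) (ignore : List Int) (node : List Nat)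
    (s s' : PySem.Set Nat)
    (h : node.foldl (fun acc num => (List.range n).foldl (calcInnerF goal ignore num) acc)
        (some s) = some s') (x : Nat) :
    x ∈ s' ↔ x ∈ s ∨ ∃ num ∈ node, succP n goal ignore num x := by
  induction node generalizing s with
  | nil => simp at h; subst h; simp
  | cons a node ih =>
    simp only [List.foldl_cons] at h
    rcases hcase : (List.range n).foldl (calcInnerF goal ignore a) (some s) with _ | s₁
    · rw [hcase, outer_none] at h; exact absurd h (by simp)
    · rw [hcase] at h
      rw [ih _ h, inner_eq_some_mem goal ignore a _ _ _ hcase x]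
      constructor
      · rintro ((hx | ⟨i, hi, hh⟩) | ⟨num, hnum, hh⟩)
        · exact Or.inl hx
        · exact Or.inr ⟨a, by simp, i, List.mem_range.mp hi, hh⟩
        · exact Or.inr ⟨num, by simp [hnum], hh⟩
      · rintro (hx | ⟨num, hnum, hh⟩)
        · exact Or.inl (Or.inl hx)
        · rcases List.mem_cons.mp hnum with rfl | hnum
          · rcases hh with ⟨i, hi, hh⟩
            exact Or.inl (Or.inr ⟨i, List.mem_range.mpr hi, hh⟩)
          · exact Or.inr ⟨num, hnum, hh⟩

-- ----- the BFS loop detects GR -----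
lemma loop_iff (n goal : Nat) (ignore : List Int) (fuel K : Nat) (node : List Nat)
    (hwf : ∀ m ∈ node, m < 2 ^ n ∧ popc n m = K) (hfuel : n + 1 ≤ fuel + K) :
    calcLoop n goal ignore fuel node = true ↔ ∃ m ∈ node, GR n goal ignore m := by
  induction fuel generalizing K node with
  | zero =>
    have hnil : node = [] := by
      rcases node with _ | ⟨m, node⟩
      · rfl
      · exfalso
        have := hwf m (by simp)
        have := popc_le n m
        omega
    subst hnil; simp [calcLoop]
  | succ fuel ih =>
    rcases hnil : node.isEmpty with _ | _
    · rw [calcLoop]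
      rw [if_neg (by simp [hnil])]
      rcases hstep : calcStep n goal ignore node with _ | nx
      · unfold calcStep at hstep
        rw [step_eq_none_iff] at hstep
        simp only [true_iff]
        rcases hstep with ⟨num, hnum, i, hi, h1, h2, h3⟩
        exact ⟨num, hnum, GR.hit num i hi h1 h2 h3⟩
      · have hmem := fun x => step_eq_some_mem n goal ignore node _ _ hstep x
        have hnohit : ¬ ∃ num ∈ node, hitP n goal ignore num := by
          intro hc
          rw [← step_eq_none_iff n goal ignore node PySem.Set.empty] at hc
          unfold calcStep at hstep; rw [hc] at hstep; exact absurd hstep (by simp)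
        rw [ih (K + 1) nx ?_ (by omega)]
        · constructor
          · rintro ⟨x, hx, hgr⟩
            rcases (hmem x).mp hx with hx0 | ⟨num, hnum, i, hi, h1, h2, h3, rfl⟩
            · rw [PySem.Set.empty_eq] at hx0; simp at hx0
            · exact ⟨num, hnum, GR.more num i hi h1 h2 h3 hgr⟩
          · rintro ⟨num, hnum, hgr⟩
            cases hgr with
            | hit num' i hi h1 h2 h3 =>
              exact absurd ⟨num, hnum, i, hi, h1, h2, h3⟩ hnohit
            | more num' i hi h1 h2 h3 hgr =>
              refine ⟨num ||| 2 ^ i, ?_, hgr⟩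
              exact (hmem _).mpr (Or.inr ⟨num, hnum, i, hi, h1, h2, h3, rfl⟩)
        · intro x hx
          rcases (hmem x).mp hx with hx0 | ⟨num, hnum, i, hi, h1, h2, h3, rfl⟩
          · rw [PySem.Set.empty_eq] at hx0; simp at hx0
          · have hw := hwf num hnum
            exact ⟨or_lt_pow num n i hw.1 hi, by rw [popc_or n num i hi h1, hw.2]⟩
    · have : node = [] := List.isEmpty_iff.mp hnil
      subst this; simp [calcLoop]

-- ----- GR at 0 is reachability of the goal -----
lemma GR_to_reach (n goal : Nat) (ignore : List Int) (m : Nat)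
    (h : GR n goal ignore m) (hr : Reach n ignore m) : Reach n ignore goal := by
  induction h with
  | hit num i hi h1 h2 h3 => rw [← h3]; exact Reach.step num i hi h1 h2 hr
  | more num i hi h1 h2 h3 _ ih => exact ih (Reach.step num i hi h1 h2 hr)

lemma reach_GR_zero (n goal : Nat) (ignore : List Int) (m : Nat)
    (hr : Reach n ignore m) (h : GR n goal ignore m) : GR n goal ignore 0 := by
  induction hr with
  | zero => exact h
  | step m i hi hb hig _ ih =>
    apply ih
    by_cases hg : m ||| 2 ^ i = goal
    · exact GR.hit m i hi hb hig hg
    · exact GR.more m i hi hb hig hg h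

lemma GR_zero_iff (n goal : Nat) (ignore : List Int) (hgoal : goal ≠ 0) :
    GR n goal ignore 0 ↔ Reach n ignore goal := by
  constructor
  · intro h; exact GR_to_reach n goal ignore 0 h Reach.zero
  · intro h
    cases h with
    | zero => exact absurd rfl hgoal
    | step m i hi hb hig hm =>
      exact reach_GR_zero n (m ||| 2 ^ i) ignore m hm (GR.hit m i hi hb hig rfl)

-- ----- A computes reachability of the goal -----
lemma calc_py_iff (N : Int) (ignore : List Int) (hN : ¬ N ≤ 0) :
    calc_py N ignore = true ↔ Reach N.toNat ignore (2 ^ N.toNat - 1) := by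
  have hn : 0 < N.toNat := by omega
  have hgoal : 2 ^ N.toNat - 1 ≠ 0 := by
    have : 2 ^ 1 ≤ 2 ^ N.toNat := Nat.pow_le_pow_right (by omega) hn
    omega
  unfold calc_py
  rw [loop_iff N.toNat (2 ^ N.toNat - 1) ignore (N.toNat + 1) 0 _ ?_ (by omega)]
  · simp only [PySem.Set.ofList, PySem.Set.add, List.foldl]
    constructor
    · rintro ⟨m, hm, hgr⟩
      simp at hm; subst hm
      exact (GR_zero_iff _ _ _ hgoal).mp hgr
    · intro h
      exact ⟨0, by simp [PySem.Set.empty_eq, PySem.Set.contains], (GR_zero_iff _ _ _ hgoal).mpr h⟩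
  · intro m hm
    simp [PySem.Set.ofList, PySem.Set.add, PySem.Set.empty_eq, PySem.Set.contains] at hm
    subst hm
    exact ⟨Nat.two_pow_pos _, popc_zero _⟩

-- ----- Reach characterisation for a positive mask -----
lemma reach_pos_iff (n : Nat) (ignore : List Int) (S : Nat) (hS : S ≠ 0) :
    Reach n ignore S ↔ ((S : Int) ∉ ignore ∧
      ∃ i < n, S.testBit i = true ∧ Reach n ignore (S ^^^ 2 ^ i)) := by
  constructor
  · intro h
    cases h with
    | zero => exact absurd rfl hS
    | step m i hi hb hig hm =>
      refine ⟨hig, i, hi, testBit_or_self m i, ?_⟩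
      rw [or_xor_cancel m i hb]; exact hm
  · rintro ⟨hig, i, hi, hbit, hm⟩
    have h1 : (S ^^^ 2 ^ i) ||| 2 ^ i = S := xor_or_cancel S i hbit
    have h2 : (S ^^^ 2 ^ i).testBit i = false := testBit_xor_self S i hbit
    have := Reach.step (n := n) (ignore := ignore) (S ^^^ 2 ^ i) i hi h2 (by rw [h1]; exact hig) hm
    rwa [h1] at this

-- ----- the DP table computes Reach -----
lemma dp_inv (n : Nat) (ignore : List Int) (k : Nat) (hk : k ≤ 2 ^ n - 1) :
    ((List.range' 1 k).foldl (dpStep n ignore)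
        ((List.replicate (2 ^ n - 1 + 1) false).set 0 true)).length = 2 ^ n ∧
    (∀ j, j ≤ k →
      (((List.range' 1 k).foldl (dpStep n ignore)
          ((List.replicate (2 ^ n - 1 + 1) false).set 0 true)).getD j false = true
        ↔ Reach n ignore j)) ∧
    (∀ j, k < j →
      ((List.range' 1 k).foldl (dpStep n ignore)
          ((List.replicate (2 ^ n - 1 + 1) false).set 0 true)).getD j false = false) := by
  have h1 : 1 ≤ 2 ^ n := Nat.one_le_two_pow
  induction k with
  | zero =>
    refine ⟨?_, ?_, ?_⟩
    · simp only [List.range'_zero, List.foldl_nil, List.length_set, List.length_replicate]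
      omega
    · intro j hj
      have hj0 : j = 0 := by omega
      subst hj0
      simp only [List.range'_zero, List.foldl_nil]
      rw [List.getD_eq_getElem?_getD, List.getElem?_set_self (by simp)]
      exact iff_of_true rfl Reach.zero
    · intro j hj
      simp only [List.range'_zero, List.foldl_nil]
      rw [List.getD_eq_getElem?_getD, List.getElem?_set_ne (by omega), List.getElem?_replicate]
      split <;> simp
  | succ k ih =>
    have hk' : k ≤ 2 ^ n - 1 := by omega
    obtain ⟨ihlen, ihle, ihgt⟩ := ih hk'
    rw [List.range'_1_concat, List.foldl_append]
    set tbl := (List.range' 1 k).foldl (dpStep n ignore)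
        ((List.replicate (2 ^ n - 1 + 1) false).set 0 true) with htbl
    simp only [List.foldl_cons, List.foldl_nil]
    rw [Nat.add_comm 1 k]
    unfold dpStep
    by_cases hig : ((k + 1 : Nat) : Int) ∈ ignore
    · rw [if_pos hig]
      refine ⟨ihlen, ?_, fun j hj => ihgt j (by omega)⟩
      intro j hj
      rcases Nat.lt_or_ge j (k + 1) with hlt | hge
      · exact ihle j (by omega)
      · have hj1 : j = k + 1 := by omega
        subst hj1
        rw [ihgt (k + 1) (by omega)]
        constructor
        · intro h; exact absurd h (by simp)
        · intro h
          exact absurd ((reach_pos_iff n ignore (k + 1) (by omega)).mp h).1 (by simpa using hig)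
    · rw [if_neg hig]
      refine ⟨by simpa using ihlen, ?_, ?_⟩
      · intro j hj
        rcases Nat.lt_or_ge j (k + 1) with hlt | hge
        · rw [List.getD_eq_getElem?_getD, List.getElem?_set_ne (by omega),
            ← List.getD_eq_getElem?_getD]
          exact ihle j (by omega)
        · have hj1 : j = k + 1 := by omega
          subst hj1
          rw [List.getD_eq_getElem?_getD, List.getElem?_set_self (by omega)]
          simp only [Option.getD_some]
          rw [List.any_eq_true]
          constructor
          · rintro ⟨i, hiL, hcond⟩
            have hi : i < n := List.mem_range.mp hiL
            rw [Bool.and_eq_true, shift_and_one, Nat.one_shiftLeft] at hcond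
            obtain ⟨hbit, hget⟩ := hcond
            have hxlt : (k + 1) ^^^ 2 ^ i < k + 1 := xor_lt_self _ i hbit
            have hreach : Reach n ignore ((k + 1) ^^^ 2 ^ i) := (ihle _ (by omega)).mp hget
            exact (reach_pos_iff n ignore (k + 1) (by omega)).mpr ⟨hig, i, hi, hbit, hreach⟩
          · intro h
            rcases (reach_pos_iff n ignore (k + 1) (by omega)).mp h with ⟨_, i, hi, hbit, hre⟩
            refine ⟨i, List.mem_range.mpr hi, ?_⟩
            rw [Bool.and_eq_true, shift_and_one, Nat.one_shiftLeft]
            have hxlt : (k + 1) ^^^ 2 ^ i < k + 1 := xor_lt_self _ i hbit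
            exact ⟨hbit, (ihle _ (by omega)).mpr hre⟩
      · intro j hj
        rw [List.getD_eq_getElem?_getD, List.getElem?_set_ne (by omega),
          ← List.getD_eq_getElem?_getD]
        exact ihgt j (by omega)

lemma calc_py_alt_iff (N : Int) (ignore : List Int) (hN : ¬ N ≤ 0) :
    calc_py_alt N ignore = true ↔ Reach N.toNat ignore (2 ^ N.toNat - 1) := by
  obtain ⟨hlen, hle, hgt⟩ := dp_inv N.toNat ignore (2 ^ N.toNat - 1) le_rfl
  unfold calc_py_alt
  rw [if_neg hN]
  exact hle (2 ^ N.toNat - 1) le_rfl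

-- ===== VERDICT (by name: the statement is the Claim_ definition above) =====
theorem calc_py_spec : Claim_equal_calc_py := by
  intro N ignore _
  unfold Spec_calc_py
  by_cases hN : N ≤ 0
  · have h0 : N.toNat = 0 := by omega
    rw [calc_py, calc_py_alt, if_pos hN, h0]
    rfl
  · rw [Bool.eq_iff_iff, calc_py_iff N ignore hN, calc_py_alt_iff N ignore hN]
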